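-- pv_equiv track=rewrite | github.com/jonathanfine/py-linhomy | py/linhomy/issue26.py | join_at
-- ===== SOURCE A (Python) =====
-- import itertools
--
-- def join_at(pairs, flags):
--     '''Return new pairs, joined when the flag is true.
--     '''
--
--     if len(flags) + 1 != len(pairs):
--         raise ValueError
--
--     value = []
--     pending = [0, 0]
--
--     # Special case the last pair - it flushes output.
--     extended_flags = itertools.chain(flags, [0])
--
--     for pair, flag in zip(pairs, extended_flags):
--
--         # Always increment pending (by pair).
--         pending[0] += pair[0]
--         pending[1] += pair[1]
--
--         if flag:
--             # If joining, increment pending again.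
--             pending[0] += 1
--             pending[1] += 1
--         else:
--             # If using, add to value and reset pending.
--             value.append(list(pending))
--             pending = [0, 0]
--
--     return value
-- ===== SOURCE B (Python) =====
-- def join_at(pairs, flags):
--     '''Return new pairs, joined when the flag is true.
--     '''
--
--     if len(flags) + 1 != len(pairs):
--         raise ValueError
--
--     # Phase 1: cut positions. A false flag at index i ends a run after pairs[i].
--     cuts = [0]
--     for i, f in enumerate(flags):
--         if not f:
--             cuts.append(i + 1)
--     cuts.append(len(pairs))
--
--     # Phase 2: partition into segments, then reduce each segment:
--     # component sums plus one per join, i.e. plus (segment length - 1).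
--     segments = [pairs[a:b] for a, b in zip(cuts, cuts[1:])]
--     return [[sum(p[0] for p in s) + len(s) - 1,
--              sum(p[1] for p in s) + len(s) - 1] for s in segments]
-- ===== Notes on version B (the rewrite author's own statement) =====
-- stated objective: alternative
-- what changed: Replaces A's single-pass fold with a mutable pending accumulator by a two-phase decomposition: first compute cut positions from the flags, partition pairs into contiguous segments by slicing, then map each segment to its component sums plus (segment length - 1).
import Mathlib
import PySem

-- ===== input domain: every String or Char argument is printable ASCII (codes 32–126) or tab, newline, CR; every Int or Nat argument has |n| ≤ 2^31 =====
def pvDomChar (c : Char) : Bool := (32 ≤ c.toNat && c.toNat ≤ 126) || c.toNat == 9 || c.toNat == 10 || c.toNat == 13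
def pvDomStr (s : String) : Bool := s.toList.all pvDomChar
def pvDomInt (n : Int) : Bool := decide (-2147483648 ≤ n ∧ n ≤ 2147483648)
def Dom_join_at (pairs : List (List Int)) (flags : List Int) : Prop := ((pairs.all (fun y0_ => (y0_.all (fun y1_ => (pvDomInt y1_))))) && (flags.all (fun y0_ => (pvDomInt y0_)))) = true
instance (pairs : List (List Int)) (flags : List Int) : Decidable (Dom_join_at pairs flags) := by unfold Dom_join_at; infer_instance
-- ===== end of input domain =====

-- B changes the decomposition: two phases (cut positions from flags, then slice and
-- reduce each segment) instead of A's single fold with a pending accumulator; same cost.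

-- ===== PORT A =====
-- literal port of A's loop body: state (value, pending0, pending1)
def aStep (st : List (List Int) × Int × Int) (pf : List Int × Int) : List (List Int) × Int × Int :=
  let p0 := st.2.1 + pf.1.getD 0 0
  let p1 := st.2.2 + pf.1.getD 1 0
  if pf.2 ≠ 0 then (st.1, p0 + 1, p1 + 1)
  else (st.1 ++ [[p0, p1]], 0, 0)

-- A zips pairs with flags extended by a trailing 0
def join_at (pairs : List (List Int)) (flags : List Int) : List (List Int) :=
  ((pairs.zip (flags ++ [0])).foldl aStep ([], 0, 0)).1

-- ===== PORT B =====
-- B's phase-1 loop body: record a cut after each false flag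
def cutStep (c : List Int) (eif : Int × Int) : List Int :=
  if eif.2 = 0 then c ++ [eif.1 + 1] else c

def join_at_alt (pairs : List (List Int)) (flags : List Int) : List (List Int) :=
  let cuts := ((PySem.List.enumerate flags 0).foldl cutStep [0]) ++ [(pairs.length : Int)]
  let segments := (cuts.zip cuts.tail).map
      (fun ab => PySem.List.slice pairs (some ab.1) (some ab.2))
  segments.map (fun s =>
    [(s.map (fun p => p.getD 0 0)).sum + (s.length : Int) - 1,
     (s.map (fun p => p.getD 1 0)).sum + (s.length : Int) - 1])

-- ===== PRECONDITION & SPEC =====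
-- A raises ValueError unless len(flags)+1 == len(pairs), and IndexError if some pair
-- has fewer than 2 entries; Pre_ excludes exactly those raising inputs.
def Pre_join_at (pairs : List (List Int)) (flags : List Int) : Prop :=
  flags.length + 1 = pairs.length ∧ ∀ p ∈ pairs, 2 ≤ p.length
instance (pairs : List (List Int)) (flags : List Int) : Decidable (Pre_join_at pairs flags) := by unfold Pre_join_at; infer_instance

def pvWitness_join_at : List (List Int) × List Int := ([[1, 2], [3, 4], [0, 5]], [1, 0])

def Spec_join_at (pairs : List (List Int)) (flags : List Int) (out : List (List Int)) : Prop := out = join_at_alt pairs flags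
instance (pairs : List (List Int)) (flags : List Int) (out : List (List Int)) : Decidable (Spec_join_at pairs flags out) := by unfold Spec_join_at; infer_instance

-- ===== CLAIM (what is proved, stated in full; the proofs are below) =====
def Claim_equal_join_at : Prop := ∀ (pairs : List (List Int)) (flags : List Int), Dom_join_at pairs flags → Pre_join_at pairs flags → Spec_join_at pairs flags (join_at pairs flags)

-- ===== LEMMAS AND PROOFS =====

-- reference segmentation: the runs of pairs joined by true flags
def splitR : List (List Int) → List Int → List (List (List Int))
  | [], _ => []
  | p :: ps, [] => [p :: ps]
  | p :: ps, f :: fs =>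
    if f = 0 then [p] :: splitR ps fs
    else match splitR ps fs with
      | s :: rest => (p :: s) :: rest
      | [] => [[p]]

def mergeSeg (s : List (List Int)) : List Int :=
  [(s.map (fun p => p.getD 0 0)).sum + (s.length : Int) - 1,
   (s.map (fun p => p.getD 1 0)).sum + (s.length : Int) - 1]

def headAdd (a b : Int) : List (List Int) → List (List Int)
  | [] => []
  | x :: r => [a + x.getD 0 0, b + x.getD 1 0] :: r

theorem splitR_ne_nil (ps : List (List Int)) (fs : List Int) (h : ps ≠ []) :
    splitR ps fs ≠ [] := by
  match ps, fs with
  | [], _ => exact absurd rfl h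
  | p :: ps, [] => simp [splitR]
  | p :: ps, f :: fs =>
    by_cases hf : f = 0 <;> simp [splitR, hf]
    cases hsr : splitR ps fs <;> simp

-- A's value component is a pure accumulator: prefix factors out
theorem joinA_prefix (l : List (List Int × Int)) (v : List (List Int)) (a b : Int) :
    (l.foldl aStep (v, a, b)).1 = v ++ (l.foldl aStep ([], a, b)).1 := by
  induction l generalizing v a b with
  | nil => simp
  | cons pf l ih =>
    simp only [List.foldl_cons, aStep]
    by_cases hf : pf.2 ≠ 0
    · simp only [if_pos hf]; exact ih v _ _
    · simp only [if_neg hf, List.nil_append]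
      rw [ih (v ++ [[a + pf.1.getD 0 0, b + pf.1.getD 1 0]]) 0 0,
        ih [[a + pf.1.getD 0 0, b + pf.1.getD 1 0]] 0 0]
      simp

-- characterisation of A's fold as headAdd over the merged segmentation
theorem joinA_char (flags : List Int) (ps : List (List Int)) (a b : Int)
    (hlen : ps.length = flags.length + 1) :
    ((ps.zip (flags ++ [0])).foldl aStep ([], a, b)).1
    = headAdd a b ((splitR ps flags).map mergeSeg) := by
  induction flags generalizing ps a b with
  | nil =>
    match ps with
    | [p] => simp [aStep, splitR, mergeSeg, headAdd]
  | cons f fs ih =>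
    match ps with
    | p :: ps =>
      have hlen' : ps.length = fs.length + 1 := by simpa using hlen
      have hne : ps ≠ [] := by intro h; simp [h] at hlen'
      by_cases hf : f = 0
      · simp only [hf, List.cons_append, List.zip_cons_cons, List.foldl_cons, aStep,
          ne_eq, not_true_eq_false, ite_false, if_neg, not_false_eq_true]
        rw [joinA_prefix, ih ps 0 0 hlen']
        obtain ⟨s, rest, hsr⟩ : ∃ s rest, splitR ps fs = s :: rest := by
          cases h : splitR ps fs with
          | nil => exact absurd h (splitR_ne_nil ps fs hne)
          | cons s rest => exact ⟨s, rest, rfl⟩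
        simp [splitR, hsr, headAdd, mergeSeg]
      · simp only [List.cons_append, List.zip_cons_cons, List.foldl_cons, aStep,
          ne_eq, hf, not_false_eq_true, ite_true, if_pos]
        rw [ih ps _ _ hlen']
        obtain ⟨s, rest, hsr⟩ : ∃ s rest, splitR ps fs = s :: rest := by
          cases h : splitR ps fs with
          | nil => exact absurd h (splitR_ne_nil ps fs hne)
          | cons s rest => exact ⟨s, rest, rfl⟩
        simp only [splitR, hsr, if_neg hf, List.map_cons, headAdd, mergeSeg,
          List.getD_cons_zero, List.getD_cons_succ, List.cons.injEq, List.length_cons,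
          List.sum_cons, and_true]
        refine ⟨?_, ?_⟩ <;> push_cast <;> ring

-- B's cuts fold factors out its accumulator
theorem cuts_prefix (l : List (Int × Int)) (acc : List Int) :
    l.foldl cutStep acc = acc ++ l.foldl cutStep [] := by
  induction l generalizing acc with
  | nil => simp
  | cons e l ih =>
    simp only [List.foldl_cons, cutStep]
    by_cases hf : e.2 = 0
    · simp only [if_pos hf, List.nil_append]
      rw [ih (acc ++ [e.1 + 1]), ih [e.1 + 1]]; simp
    · simp only [if_neg hf]; exact ih acc

-- B's phase-1 cut list starting at offset k, and partition of xs along a cut list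
def cutsOf (flags : List Int) (k : Int) : List Int :=
  (PySem.List.enumerate flags k).foldl cutStep [k]

def partsBy (xs : List (List Int)) (cuts : List Int) : List (List (List Int)) :=
  (cuts.zip cuts.tail).map (fun ab => PySem.List.slice xs (some ab.1) (some ab.2))

theorem cutsOf_eq (flags : List Int) (k : Int) :
    cutsOf flags k = k :: (PySem.List.enumerate flags k).foldl cutStep [] := by
  unfold cutsOf; rw [cuts_prefix]; rfl

theorem mem_auxC (flags : List Int) (k : Int) (x : Int)
    (hx : x ∈ (PySem.List.enumerate flags k).foldl cutStep []) : k + 1 ≤ x := by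
  induction flags generalizing k with
  | nil => simp [PySem.List.enumerate_nil] at hx
  | cons f fs ih =>
    rw [PySem.List.enumerate_cons] at hx
    simp only [List.foldl_cons, cutStep] at hx
    by_cases hf : f = 0
    · rw [if_pos hf, cuts_prefix] at hx
      simp only [List.nil_append, List.cons_append, List.mem_cons] at hx
      rcases hx with h | h
      · omega
      · have := ih (k + 1) h; omega
    · rw [if_neg hf] at hx
      have := ih (k + 1) hx; omega

theorem partsBy_cons (xs : List (List Int)) (a b : Int) (rest : List Int) :
    partsBy xs (a :: b :: rest) = PySem.List.slice xs (some a) (some b) :: partsBy xs (b :: rest) := by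
  simp [partsBy]

-- pulling the element at index pre.length out of a slice that starts there
theorem slice_head (pre ps' : List (List Int)) (p : List Int) (c : Int)
    (hc : (pre.length : Int) + 1 ≤ c) :
    PySem.List.slice (pre ++ p :: ps') (some (pre.length : Int)) (some c)
    = p :: PySem.List.slice (pre ++ p :: ps') (some ((pre.length : Int) + 1)) (some c) := by
  have h0 : (0 : Int) ≤ (pre.length : Int) := by positivity
  have hb : (0 : Int) ≤ c := by omega
  rw [PySem.List.slice_toNat _ h0 hb, PySem.List.slice_toNat _ (by omega) hb]
  have ht : ((pre.length : Int)).toNat = pre.length := by omega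
  have ht1 : ((pre.length : Int) + 1).toNat = pre.length + 1 := by omega
  rw [ht, ht1]
  have hd : (pre ++ p :: ps').drop pre.length = p :: ps' := by simp
  have hd1 : (pre ++ p :: ps').drop (pre.length + 1) = ps' := by
    rw [← List.drop_drop, hd]; rfl
  rw [hd, hd1]
  obtain ⟨n, hn1, hn2⟩ : ∃ n, c.toNat - pre.length = n + 1 ∧ c.toNat - (pre.length + 1) = n := by
    refine ⟨c.toNat - (pre.length + 1), by omega, rfl⟩
  rw [hn1, hn2, List.take_succ_cons]

-- partition-by-cuts equals the reference segmentation
theorem parts_eq_splitR (flags : List Int) (ps pre : List (List Int))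
    (hlen : ps.length = flags.length + 1) :
    partsBy (pre ++ ps) (cutsOf flags (pre.length : Int) ++ [(((pre ++ ps).length : Nat) : Int)])
    = splitR ps flags := by
  induction flags generalizing ps pre with
  | nil =>
    match ps with
    | [p] =>
      rw [cutsOf_eq]
      simp only [PySem.List.enumerate_nil, List.foldl_nil]
      have hN : (((pre ++ [p]).length : Nat) : Int) = ((pre.length : Nat) : Int) + ((1 : Nat) : Int) := by
        simp
      simp only [List.cons_append, List.nil_append]
      rw [partsBy_cons, hN, PySem.List.slice_natCast_add]
      simp [partsBy, splitR]
  | cons f fs ih =>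
    match ps with
    | p :: ps' =>
      have hlen' : ps'.length = fs.length + 1 := by simpa using hlen
      have hne : ps' ≠ [] := by intro h; simp [h] at hlen'
      have hassoc : pre ++ p :: ps' = (pre ++ [p]) ++ ps' := by simp
      have hk1 : (pre.length : Int) + 1 = (((pre ++ [p]).length : Nat) : Int) := by simp
      have hIH := ih ps' (pre ++ [p]) hlen'
      rw [← hassoc, ← hk1] at hIH
      rw [cutsOf_eq fs ((pre.length : Int) + 1)] at hIH
      simp only [List.cons_append, List.nil_append] at hIH
      have hcons : cutsOf (f :: fs) (pre.length : Int)
          = (pre.length : Int) :: cutStep [] ((pre.length : Int), f)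
            ++ (PySem.List.enumerate fs ((pre.length : Int) + 1)).foldl cutStep [] := by
        unfold cutsOf
        rw [PySem.List.enumerate_cons, List.foldl_cons, cuts_prefix]
        by_cases hf : f = 0 <;> simp [cutStep, hf]
      by_cases hf : f = 0
      · rw [hcons]
        simp only [cutStep, if_pos hf, List.nil_append, List.cons_append]
        rw [partsBy_cons, hIH]
        have h1 : PySem.List.slice (pre ++ p :: ps') (some (pre.length : Int))
            (some ((pre.length : Int) + 1))
            = [p] := by
          rw [slice_head pre ps' p _ (by omega)]
          rw [PySem.List.slice_toNat _ (by positivity) (by positivity)]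
          simp
        rw [h1]
        simp [splitR, hf]
      · rw [hcons]
        simp only [cutStep, if_neg hf, List.nil_append]
        obtain ⟨s, rest, hsr⟩ : ∃ s rest, splitR ps' fs = s :: rest := by
          cases h : splitR ps' fs with
          | nil => exact absurd h (splitR_ne_nil ps' fs hne)
          | cons s rest => exact ⟨s, rest, rfl⟩
        -- decompose the remaining cut list and bound its head
        cases haux : (PySem.List.enumerate fs ((pre.length : Int) + 1)).foldl cutStep [] with
        | nil =>
          rw [haux] at hIH
          simp only [List.nil_append, List.cons_append] at hIH ⊢
          rw [partsBy_cons, hsr] at hIH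
          rw [partsBy_cons]
          have hc : (pre.length : Int) + 1 ≤ (((pre ++ p :: ps').length : Nat) : Int) := by
            simp only [List.length_append, List.length_cons]; push_cast; omega
          rw [slice_head pre ps' p _ hc]
          rw [List.cons.injEq] at hIH
          rw [hIH.1, hIH.2]
          simp [splitR, hf, hsr]
        | cons c0 aux' =>
          rw [haux] at hIH
          simp only [List.cons_append, List.nil_append] at hIH ⊢
          rw [partsBy_cons, hsr] at hIH
          rw [partsBy_cons]
          have hc : (pre.length : Int) + 1 ≤ c0 := by
            have : c0 ∈ (PySem.List.enumerate fs ((pre.length : Int) + 1)).foldl cutStep [] := by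
              rw [haux]; exact List.mem_cons_self
            have := mem_auxC fs ((pre.length : Int) + 1) c0 this
            omega
          rw [slice_head pre ps' p _ hc]
          rw [List.cons.injEq] at hIH
          rw [hIH.1, hIH.2]
          simp [splitR, hf, hsr]

theorem join_at_spec : Claim_equal_join_at := by
  unfold Claim_equal_join_at
  intro pairs flags _ hpre
  unfold Spec_join_at
  obtain ⟨hlen, -⟩ := hpre
  have hne : pairs ≠ [] := by intro h; simp [h] at hlen
  unfold join_at
  rw [joinA_char flags pairs 0 0 (by omega)]
  simp only [join_at_alt]
  have hB := parts_eq_splitR flags pairs [] (by omega)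
  unfold partsBy cutsOf at hB
  simp only [List.nil_append, List.length_nil, Nat.cast_zero] at hB
  rw [hB]
  have hmap : (splitR pairs flags).map (fun s =>
      [(s.map (fun p => p.getD 0 0)).sum + (s.length : Int) - 1,
       (s.map (fun p => p.getD 1 0)).sum + (s.length : Int) - 1])
      = (splitR pairs flags).map mergeSeg := by
    simp [mergeSeg]
  rw [hmap]
  obtain ⟨s, rest, hsr⟩ : ∃ s rest, splitR pairs flags = s :: rest := by
    cases h : splitR pairs flags with
    | nil => exact absurd h (splitR_ne_nil pairs flags hne)
    | cons s rest => exact ⟨s, rest, rfl⟩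
  rw [hsr]
  simp [headAdd, mergeSeg]
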